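-- pv_equiv track=rewrite | github.com/mitrandir-pl/AOIS | lab4/laba_4.py | to_SDNF
-- ===== SOURCE A (Python) =====
-- def to_SDNF(index, table, key=None):
--     SDNF = ""
--     for column in table:
--         if column[index] == 1:
--             SDNF += " + "
--             if column[0] == 1:
--                 SDNF += "a*"
--             else:
--                 SDNF += "!a*"
--             if column[1] == 1:
--                 SDNF += "b*"
--             else:
--                 SDNF += "!b*"
--             if column[2] == 1:
--                 SDNF += "c"
--             else:
--                 SDNF += "!c"
--             if key == 4:
--                 if column[3] == 1:
--                     SDNF += "*d"
--                 else:
--                     SDNF += "*!d"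
--     return SDNF[3:]
-- ===== SOURCE B (Python) =====
-- def to_SDNF(index, table, key=None):
--     names = ['a', 'b', 'c'] + (['d'] if key == 4 else [])
--     terms = []
--     for column in table:
--         if column[index] == 1:
--             terms.append('*'.join(n if column[i] == 1 else '!' + n
--                                   for i, n in enumerate(names)))
--     return ' + '.join(terms)
-- ===== Notes on version B (the rewrite author's own statement) =====
-- stated objective: simpler
-- what changed: Replaces the four hardcoded per-variable if/else string concatenations and the SDNF[3:] prefix-strip with a data-driven inner loop over a variable-name list, building each term with '*'.join and the result with ' + '.join.
import Mathlib
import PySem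

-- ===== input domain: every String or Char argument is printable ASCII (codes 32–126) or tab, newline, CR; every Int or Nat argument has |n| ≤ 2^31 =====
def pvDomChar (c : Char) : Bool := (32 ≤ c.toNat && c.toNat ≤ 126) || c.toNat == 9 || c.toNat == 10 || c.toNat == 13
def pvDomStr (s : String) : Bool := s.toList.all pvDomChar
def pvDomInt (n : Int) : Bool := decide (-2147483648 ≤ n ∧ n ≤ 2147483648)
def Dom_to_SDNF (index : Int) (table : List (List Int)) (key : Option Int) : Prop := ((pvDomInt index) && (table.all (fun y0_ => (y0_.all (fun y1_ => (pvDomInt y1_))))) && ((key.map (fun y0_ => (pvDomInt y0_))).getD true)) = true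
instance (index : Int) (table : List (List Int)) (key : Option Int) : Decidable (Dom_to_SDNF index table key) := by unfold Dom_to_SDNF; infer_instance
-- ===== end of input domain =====

-- B replaces A's four hardcoded per-variable if/else blocks and the SDNF[3:] prefix-strip
-- with a data-driven loop over a variable-name list plus '*'/' + ' joins (objective: simpler).
-- ===== PORT A =====
def to_SDNF (index : Int) (table : List (List Int)) (key : Option Int) : String :=
  let SDNF : List Char := table.foldl (fun SDNF column =>
    if PySem.List.pyGetD column index 0 = 1 then
      let s1 := SDNF ++ [' ', '+', ' ']
      let s2 := s1 ++ (if PySem.List.pyGetD column 0 0 = 1 then ['a', '*'] else ['!', 'a', '*'])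
      let s3 := s2 ++ (if PySem.List.pyGetD column 1 0 = 1 then ['b', '*'] else ['!', 'b', '*'])
      let s4 := s3 ++ (if PySem.List.pyGetD column 2 0 = 1 then ['c'] else ['!', 'c'])
      if key = some 4 then
        s4 ++ (if PySem.List.pyGetD column 3 0 = 1 then ['*', 'd'] else ['*', '!', 'd'])
      else s4
    else SDNF) []
  String.ofList (PySem.List.slice SDNF (some 3) none)

-- ===== PORT B =====
-- '*'.join(n if column[i] == 1 else '!' + n for i, n in enumerate(names))
def pvTerm (column : List Int) (names : List Char) : List Char :=
  PySem.Chars.join ['*'] ((PySem.List.enumerate names).map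
    (fun p => if PySem.List.pyGetD column p.1 0 = 1 then [p.2] else ['!', p.2]))

def to_SDNF_alt (index : Int) (table : List (List Int)) (key : Option Int) : String :=
  let names : List Char := ['a', 'b', 'c'] ++ (if key = some 4 then ['d'] else [])
  let terms : List (List Char) := table.foldl (fun terms column =>
    if PySem.List.pyGetD column index 0 = 1 then terms ++ [pvTerm column names] else terms) []
  String.ofList (PySem.Chars.join [' ', '+', ' '] terms)

-- ===== PRECONDITION & SPEC =====
-- Pre_ excludes exactly the inputs where the Python A raises IndexError: a row where
-- column[index] is out of range, or a selected row (column[index] == 1) shorter than the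
-- variables read (3, or 4 when key == 4). B raises on exactly the same inputs.
def Pre_to_SDNF (index : Int) (table : List (List Int)) (key : Option Int) : Prop :=
  ∀ column ∈ table, PySem.Raise.InRange column.length index ∧
    (PySem.List.pyGetD column index 0 = 1 →
      3 ≤ column.length ∧ (key = some 4 → 4 ≤ column.length))
instance (index : Int) (table : List (List Int)) (key : Option Int) : Decidable (Pre_to_SDNF index table key) := by unfold Pre_to_SDNF; infer_instance
def pvWitness_to_SDNF : Int × List (List Int) × Option Int := (0, [[1, 1, 0, 1], [0, 1, 1]], none)

def Spec_to_SDNF (index : Int) (table : List (List Int)) (key : Option Int) (out : String) : Prop := out = to_SDNF_alt index table key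
instance (index : Int) (table : List (List Int)) (key : Option Int) (out : String) : Decidable (Spec_to_SDNF index table key out) := by unfold Spec_to_SDNF; infer_instance

-- ===== CLAIM (what is proved, stated in full; the proofs are below) =====
def Claim_equal_to_SDNF : Prop := ∀ (index : Int) (table : List (List Int)) (key : Option Int), Dom_to_SDNF index table key → Pre_to_SDNF index table key → Spec_to_SDNF index table key (to_SDNF index table key)

-- ===== LEMMAS AND PROOFS =====

-- A's per-selected-row contribution, including the " + " prefix
def pvChunk (column : List Int) (key : Option Int) : List Char :=
  [' ', '+', ' ']
    ++ (if PySem.List.pyGetD column 0 0 = 1 then ['a', '*'] else ['!', 'a', '*'])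
    ++ (if PySem.List.pyGetD column 1 0 = 1 then ['b', '*'] else ['!', 'b', '*'])
    ++ (if PySem.List.pyGetD column 2 0 = 1 then ['c'] else ['!', 'c'])
    ++ (if key = some 4 then
          (if PySem.List.pyGetD column 3 0 = 1 then ['*', 'd'] else ['*', '!', 'd'])
        else [])

lemma loopA_eq_flatMap (index : Int) (key : Option Int) (table : List (List Int)) (acc : List Char) :
    table.foldl (fun SDNF column =>
      if PySem.List.pyGetD column index 0 = 1 then
        let s1 := SDNF ++ [' ', '+', ' ']
        let s2 := s1 ++ (if PySem.List.pyGetD column 0 0 = 1 then ['a', '*'] else ['!', 'a', '*'])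
        let s3 := s2 ++ (if PySem.List.pyGetD column 1 0 = 1 then ['b', '*'] else ['!', 'b', '*'])
        let s4 := s3 ++ (if PySem.List.pyGetD column 2 0 = 1 then ['c'] else ['!', 'c'])
        if key = some 4 then
          s4 ++ (if PySem.List.pyGetD column 3 0 = 1 then ['*', 'd'] else ['*', '!', 'd'])
        else s4
      else SDNF) acc
    = acc ++ table.flatMap (fun column =>
        if PySem.List.pyGetD column index 0 = 1 then pvChunk column key else []) := by
  induction table generalizing acc with
  | nil => simp
  | cons c cs ih =>
    simp only [List.foldl_cons, List.flatMap_cons, ih]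
    by_cases h : PySem.List.pyGetD c index 0 = 1 <;>
      by_cases hk : key = some 4 <;>
      simp [h, hk, pvChunk]

lemma loopB_eq_flatMap (index : Int) (names : List Char) (table : List (List Int)) (acc : List (List Char)) :
    table.foldl (fun terms column =>
      if PySem.List.pyGetD column index 0 = 1 then terms ++ [pvTerm column names] else terms) acc
    = acc ++ table.flatMap (fun column =>
        if PySem.List.pyGetD column index 0 = 1 then [pvTerm column names] else []) := by
  induction table generalizing acc with
  | nil => simp
  | cons c cs ih =>
    simp only [List.foldl_cons, List.flatMap_cons, ih]
    by_cases h : PySem.List.pyGetD c index 0 = 1 <;> simp [h]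

-- each selected row's chunk is " + " followed by B's term
lemma chunk_eq_term (column : List Int) (key : Option Int) :
    pvChunk column key
      = [' ', '+', ' '] ++ pvTerm column (['a', 'b', 'c'] ++ (if key = some 4 then ['d'] else [])) := by
  by_cases hk : key = some 4 <;>
    simp only [pvChunk, pvTerm, hk] <;>
    split_ifs <;>
    simp_all [PySem.Chars.join, PySem.List.enumerate, List.intercalate]

lemma join_cons_eq (sep : List Char) (t : List Char) (ts : List (List Char)) :
    PySem.Chars.join sep (t :: ts) = t ++ ts.flatMap (fun u => sep ++ u) := by
  induction ts generalizing t with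
  | nil => simp [PySem.Chars.join_singleton]
  | cons u us ih => rw [PySem.Chars.join_cons_cons, List.flatMap_cons, ih u]; simp

lemma drop3_flatMap_prefix (sep : List Char) (hsep : sep.length = 3) (ts : List (List Char)) :
    (ts.flatMap (fun u => sep ++ u)).drop 3 = PySem.Chars.join sep ts := by
  cases ts with
  | nil => simp [PySem.Chars.join_nil]
  | cons t ts =>
    rw [join_cons_eq, List.flatMap_cons, List.append_assoc, List.drop_append_of_le_length (by omega)]
    simp [hsep]

-- ===== VERDICT (by name: the statement is the Claim_ definition above) =====
theorem to_SDNF_spec : Claim_equal_to_SDNF := by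
  intro index table key _ _
  unfold Spec_to_SDNF to_SDNF to_SDNF_alt
  dsimp only
  rw [loopA_eq_flatMap, loopB_eq_flatMap, List.nil_append, List.nil_append]
  have h3 : PySem.List.slice
      (table.flatMap (fun column => if PySem.List.pyGetD column index 0 = 1 then pvChunk column key else []))
      (some 3) none
      = (table.flatMap (fun column => if PySem.List.pyGetD column index 0 = 1 then pvChunk column key else [])).drop 3 := by
    exact_mod_cast PySem.List.slice_from_natCast _ 3
  rw [h3]
  congr 1
  have hfun : ∀ c : List Int,
      (if PySem.List.pyGetD c index 0 = 1 then pvChunk c key else [])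
        = (if PySem.List.pyGetD c index 0 = 1 then [pvTerm c (['a', 'b', 'c'] ++ (if key = some 4 then ['d'] else []))] else []).flatMap
            (fun u => [' ', '+', ' '] ++ u) := by
    intro c
    by_cases h : PySem.List.pyGetD c index 0 = 1 <;> simp [h, chunk_eq_term]
  have this : (table.flatMap (fun column => if PySem.List.pyGetD column index 0 = 1 then pvChunk column key else []))
      = (table.flatMap (fun column => if PySem.List.pyGetD column index 0 = 1 then [pvTerm column (['a', 'b', 'c'] ++ (if key = some 4 then ['d'] else []))] else [])).flatMap (fun u => [' ', '+', ' '] ++ u) := by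
    rw [List.flatMap_assoc]
    exact List.flatMap_congr (fun c _ => hfun c)
  rw [this]
  exact drop3_flatMap_prefix _ (by rfl) _
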